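-- pv_equiv track=rewrite | github.com/CadenSc/DataScienceFinal | feature_engineering.py | rolling_count_available
-- ===== SOURCE A (Python) =====
-- from collections import deque
--
-- def rolling_count_available(values: list[float | None], window: int) -> list[int]:
--     counts: list[int] = []
--     active_flags: deque[bool] = deque()
--     active_count = 0
--     for value in values:
--         has_value = value is not None
--         active_flags.append(has_value)
--         active_count += 1 if has_value else 0
--         if len(active_flags) > window:
--             active_count -= 1 if active_flags.popleft() else 0
--         counts.append(active_count)
--     return counts
-- ===== SOURCE B (Python) =====
-- def rolling_count_available(values, window):
--     prefix = [0]
--     for v in values: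
--         prefix.append(prefix[-1] + (1 if v is not None else 0))
--     result = []
--     for i in range(len(values)):
--         hi = i + 1
--         lo = min(hi, max(0, hi - window))
--         result.append(prefix[hi] - prefix[lo])
--     return result
-- ===== Notes on version B (the rewrite author's own statement) =====
-- stated objective: alternative
-- what changed: Replaces the incremental deque with single-element eviction by a precomputed prefix-count table queried by clamped index differencing in a second pass.
import Mathlib
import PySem

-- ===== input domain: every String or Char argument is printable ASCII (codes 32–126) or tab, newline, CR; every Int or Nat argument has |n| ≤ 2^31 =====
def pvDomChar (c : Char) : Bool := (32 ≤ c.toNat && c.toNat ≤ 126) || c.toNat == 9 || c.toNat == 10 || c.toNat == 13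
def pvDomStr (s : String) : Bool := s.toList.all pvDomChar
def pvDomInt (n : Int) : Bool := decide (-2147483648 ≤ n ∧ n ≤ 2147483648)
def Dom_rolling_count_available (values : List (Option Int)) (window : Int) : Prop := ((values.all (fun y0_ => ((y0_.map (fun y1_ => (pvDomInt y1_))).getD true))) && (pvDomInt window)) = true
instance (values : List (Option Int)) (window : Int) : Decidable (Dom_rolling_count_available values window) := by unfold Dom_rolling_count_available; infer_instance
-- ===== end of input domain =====

-- B replaces A's incremental deque-eviction pass by a prefix-count table queried by
-- clamped index differencing (alternative decomposition, same O(n) cost).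

-- ===== PORT A =====
-- the deque is a List Bool; popleft = headI/tail, exact here since the deque is
-- nonempty right after the append
def rcaLoop (window : Int) : List (Option Int) → List Bool → Int → List Int
  | [], _flags, _cnt => []
  | v :: rest, flags, cnt =>
    let has_value := v.isSome
    let flags1 := flags ++ [has_value]
    let cnt1 := cnt + (if has_value then 1 else 0)
    if (flags1.length : Int) > window then
      let cnt2 := cnt1 - (if flags1.headI then 1 else 0)
      cnt2 :: rcaLoop window rest flags1.tail cnt2
    else
      cnt1 :: rcaLoop window rest flags1 cnt1

def rolling_count_available (values : List (Option Int)) (window : Int) : List Int :=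
  rcaLoop window values [] 0

-- ===== PORT B =====
-- prefix[-1] on the nonempty prefix list = getLastD
def altStep (p : List Int) (v : Option Int) : List Int :=
  p ++ [p.getLastD 0 + (if v.isSome then 1 else 0)]

def rolling_count_available_alt (values : List (Option Int)) (window : Int) : List Int :=
  let pref := values.foldl altStep [0]
  (List.range values.length).map (fun (i : Nat) =>
    let hi : Int := (i : Int) + 1
    let lo : Int := min hi (max 0 (hi - window))
    pref.getD hi.toNat 0 - pref.getD lo.toNat 0)

-- ===== PRECONDITION & SPEC =====
def Spec_rolling_count_available (values : List (Option Int)) (window : Int) (out : List Int) : Prop := out = rolling_count_available_alt values window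
instance (values : List (Option Int)) (window : Int) (out : List Int) : Decidable (Spec_rolling_count_available values window out) := by unfold Spec_rolling_count_available; infer_instance

-- ===== CLAIM (what is proved, stated in full; the proofs are below) =====
def Claim_equal_rolling_count_available : Prop := ∀ (values : List (Option Int)) (window : Int), Dom_rolling_count_available values window → Spec_rolling_count_available values window (rolling_count_available values window)

-- ===== LEMMAS AND PROOFS =====

-- number of `true`s, as an Int
def tcount : List Bool → Int
  | [] => 0
  | b :: bs => (if b then 1 else 0) + tcount bs

-- number of non-None entries, as an Int
def cntSome : List (Option Int) → Int
  | [] => 0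
  | v :: vs => (if v.isSome then 1 else 0) + cntSome vs

-- keep the last W elements
def keepLast (W : Nat) (l : List Bool) : List Bool := l.drop (l.length - W)

-- the prefix-count list starting from running count c
def scanCnt (c : Int) : List (Option Int) → List Int
  | [] => [c]
  | v :: vs => c :: scanCnt (c + (if v.isSome then 1 else 0)) vs

lemma tcount_append (l₁ l₂ : List Bool) : tcount (l₁ ++ l₂) = tcount l₁ + tcount l₂ := by
  induction l₁ with
  | nil => simp [tcount]
  | cons b bs ih => simp [tcount, ih]; ring

lemma tcount_take_drop (l : List Bool) (k : Nat) :
    tcount l = tcount (l.take k) + tcount (l.drop k) := by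
  conv_lhs => rw [← List.take_append_drop k l]
  rw [tcount_append]

lemma cntSome_eq_tcount (l : List (Option Int)) :
    cntSome l = tcount (l.map (·.isSome)) := by
  induction l with
  | nil => rfl
  | cons v vs ih => simp [cntSome, tcount, ih]

lemma keepLast_stable (W : Nat) (l X : List Bool) :
    keepLast W (keepLast W l ++ X) = keepLast W (l ++ X) := by
  unfold keepLast
  rw [List.drop_append, List.drop_append, List.drop_drop]
  simp only [List.length_append, List.length_drop]
  congr 1
  · congr 1
    omega
  · congr 1
    omega

-- A's loop body, characterised: one step keeps the last W flags
lemma rcaLoop_cons (window : Int) (v : Option Int) (vs : List (Option Int)) (flags : List Bool)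
    (h : flags.length ≤ window.toNat) :
    rcaLoop window (v :: vs) flags (tcount flags) =
      tcount (keepLast window.toNat (flags ++ [v.isSome])) ::
        rcaLoop window vs (keepLast window.toNat (flags ++ [v.isSome]))
          (tcount (keepLast window.toNat (flags ++ [v.isSome]))) := by
  set W := window.toNat with hW
  have hflags2 : keepLast W (flags ++ [v.isSome]) =
      if (flags ++ [v.isSome]).length > W then (flags ++ [v.isSome]).tail else (flags ++ [v.isSome]) := by
    unfold keepLast
    split
    · have : (flags ++ [v.isSome]).length - W = 1 := by simp at *; omega
      rw [this, List.drop_one]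
    · have : (flags ++ [v.isSome]).length - W = 0 := by simp at *; omega
      rw [this, List.drop_zero]
  have hcnt2 : tcount (keepLast W (flags ++ [v.isSome])) =
      if (flags ++ [v.isSome]).length > W then
        (tcount flags + (if v.isSome then 1 else 0)) - (if (flags ++ [v.isSome]).headI then 1 else 0)
      else tcount flags + (if v.isSome then 1 else 0) := by
    rw [hflags2]
    split
    · cases flags with
      | nil => cases hv : v.isSome <;> simp [tcount]
      | cons f fs =>
        cases f <;> cases hv : v.isSome <;> simp [tcount, tcount_append, add_comm]
    · rw [tcount_append]; simp [tcount]
  rw [rcaLoop]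
  simp only []
  by_cases hc : (flags ++ [v.isSome]).length > W
  · have hcI : ((flags ++ [v.isSome]).length : Int) > window := by
      simp only [List.length_append, List.length_singleton] at hc ⊢; omega
    rw [if_pos hcI, hcnt2, if_pos hc, hflags2, if_pos hc]
  · have hcI : ¬ ((flags ++ [v.isSome]).length : Int) > window := by
      simp only [List.length_append, List.length_singleton] at hc ⊢; omega
    rw [if_neg hcI, hcnt2, if_neg hc, hflags2, if_neg hc]

-- A's loop, characterised: each output is the true-count of the last W flags
lemma rcaLoop_eq (window : Int) (rest : List (Option Int)) (flags : List Bool)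
    (h : flags.length ≤ window.toNat) :
    rcaLoop window rest flags (tcount flags) =
      (List.range rest.length).map (fun j =>
        tcount (keepLast window.toNat (flags ++ ((rest.take (j+1)).map (·.isSome))))) := by
  induction rest generalizing flags with
  | nil => simp [rcaLoop]
  | cons v vs ih =>
    set W := window.toNat with hW
    have hlen2 : (keepLast W (flags ++ [v.isSome])).length ≤ W := by
      unfold keepLast; simp only [List.length_drop, List.length_append]; omega
    rw [rcaLoop_cons window v vs flags h, ih _ hlen2]
    rw [List.length_cons, List.range_succ_eq_map, List.map_cons, List.map_map]
    congr 1
    apply List.map_congr_left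
    intro j hj
    simp only [Function.comp_apply, List.take_succ_cons, List.map_cons]
    have hsplit : flags ++ v.isSome :: List.map (fun x => x.isSome) (List.take (j+1) vs)
        = (flags ++ [v.isSome]) ++ List.map (fun x => x.isSome) (List.take (j+1) vs) := by simp
    rw [hsplit, keepLast_stable]

-- B's foldl builds scanCnt
lemma foldl_altStep (vs : List (Option Int)) (init : List Int) (c : Int) :
    vs.foldl altStep (init ++ [c]) = init ++ scanCnt c vs := by
  induction vs generalizing init c with
  | nil => simp [scanCnt]
  | cons v rest ih =>
    rw [List.foldl_cons]
    have : altStep (init ++ [c]) v = (init ++ [c]) ++ [c + (if v.isSome then 1 else 0)] := by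
      simp [altStep]
    rw [this, ih]
    simp [scanCnt]

lemma scanCnt_getD (vs : List (Option Int)) (c : Int) (k : Nat) (hk : k ≤ vs.length) :
    (scanCnt c vs).getD k 0 = c + cntSome (vs.take k) := by
  induction vs generalizing c k with
  | nil =>
    have : k = 0 := by simpa using hk
    subst this
    simp [scanCnt, cntSome]
  | cons v rest ih =>
    cases k with
    | zero => simp [scanCnt, cntSome]
    | succ k' =>
      simp only [scanCnt, List.getD_cons_succ, List.take_succ_cons, cntSome]
      rw [ih _ _ (by simpa using hk)]
      ring

theorem rca_main (values : List (Option Int)) (window : Int) :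
    rolling_count_available values window = rolling_count_available_alt values window := by
  unfold rolling_count_available rolling_count_available_alt
  have hA := rcaLoop_eq window values [] (by simp)
  simp only [tcount, List.nil_append] at hA
  have hp : values.foldl altStep [0] = scanCnt 0 values := by
    have := foldl_altStep values [] 0
    simpa using this
  rw [hA, hp]
  dsimp only
  apply List.map_congr_left
  intro j hj
  rw [List.mem_range] at hj
  have hj1 : j + 1 ≤ values.length := hj
  set W := window.toNat with hW
  have hlo : (min ((j : Int) + 1) (max 0 ((j : Int) + 1 - window))).toNat = j + 1 - W := by
    rcases le_total ((j : Int) + 1 - window) 0 with h | h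
    · rw [max_eq_left h]
      omega
    · rw [max_eq_right h]
      rcases le_total ((j : Int) + 1) ((j : Int) + 1 - window) with h2 | h2
      · rw [min_eq_left h2]; omega
      · rw [min_eq_right h2]; omega
  have hhi : ((j : Int) + 1).toNat = j + 1 := by omega
  rw [hhi, hlo]
  rw [scanCnt_getD _ _ _ hj1, scanCnt_getD _ _ _ (by omega)]
  simp only [zero_add]
  -- goal: tcount (keepLast W ((values.take (j+1)).map isSome)) = cntSome (take (j+1)) - cntSome (take (j+1-W))
  have hlen : ((values.take (j+1)).map (·.isSome)).length = j + 1 := by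
    simp [List.length_take]; omega
  unfold keepLast
  rw [hlen]
  have hsplit := tcount_take_drop ((values.take (j+1)).map (·.isSome)) (j + 1 - W)
  have htake : ((values.take (j+1)).map (·.isSome)).take (j + 1 - W)
      = (values.take (j + 1 - W)).map (·.isSome) := by
    rw [← List.map_take, List.take_take]
    have hmin : min (j + 1 - W) (j + 1) = j + 1 - W := by omega
    rw [hmin]
  rw [← cntSome_eq_tcount, htake, ← cntSome_eq_tcount] at hsplit
  omega

-- ===== VERDICT (by name: the statement is the Claim_ definition above) =====
theorem rolling_count_available_spec : Claim_equal_rolling_count_available := by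
  intro values window _
  unfold Spec_rolling_count_available
  exact rca_main values window
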